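-- pv_equiv track=rewrite | github.com/ShrimpHeavenNow/AdventofCOde2020 | AoC2020-6.py | fart_attack
-- ===== SOURCE A (Python) =====
-- def fart_attack(customs):
--     entries = []
--     finished_entry = []
--     for x in customs:
--         entry = []
--         if x != "":  # Check if line is part of previous lines entry
--             entry.append(x)
--             entry = entry[0].split(" ")
--             finished_entry = finished_entry + entry
--         else:
--             entries.append((finished_entry))
--             finished_entry = []
--     entries.append((finished_entry))  # Adds lest entry into list.
--
--     return entries
-- ===== SOURCE B (Python) =====
-- def fart_attack(customs):
--     # Build the result back-to-front: walk the lines in reverse with a single list,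
--     # opening a new group at each blank line and prepending each line's words into
--     # the current head group.
--     entries = [[]]
--     for x in reversed(customs):
--         if x == "":
--             entries.insert(0, [])
--         else:
--             entries[0] = x.split(" ") + entries[0]
--     return entries
-- ===== Notes on version B (the rewrite author's own statement) =====
-- stated objective: alternative
-- what changed: B builds the result back-to-front: it walks the lines in reverse with a single list, consing a fresh empty group at each blank line and prepending each line's words into the current head group, instead of A's forward loop with two accumulators (entries, finished_entry) and a final append.
import Mathlib
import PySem

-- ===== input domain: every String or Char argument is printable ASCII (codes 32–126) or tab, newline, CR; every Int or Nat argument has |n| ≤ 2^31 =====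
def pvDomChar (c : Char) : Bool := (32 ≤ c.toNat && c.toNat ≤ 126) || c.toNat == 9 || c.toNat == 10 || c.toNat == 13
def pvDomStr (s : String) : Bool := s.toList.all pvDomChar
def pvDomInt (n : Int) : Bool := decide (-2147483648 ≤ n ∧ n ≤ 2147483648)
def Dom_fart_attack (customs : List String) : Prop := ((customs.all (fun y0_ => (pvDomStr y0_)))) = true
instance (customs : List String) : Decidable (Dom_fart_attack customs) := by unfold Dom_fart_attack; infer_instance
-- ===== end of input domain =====

-- B builds the result back-to-front (reverse walk, cons a group per blank, prepend words into the head group) instead of A's forward two-accumulator loop; same return value.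

-- ===== PORT A =====
-- s.split(" "): sep is nonempty so Str.split? always returns some; exact on all inputs
def pvSplit (s : String) : List String := (PySem.Str.split? s " ").getD []

-- A's fused forward loop: state (entries, finished_entry); a nonempty line appends its
-- words to finished_entry, a blank line pushes finished_entry onto entries and resets it;
-- finished_entry is appended once more at the end.
def fart_attack (customs : List String) : List (List String) :=
  let st := customs.foldl
    (fun (s : List (List String) × List String) x =>
      if x ≠ "" then (s.1, s.2 ++ pvSplit x)
      else (s.1 ++ [s.2], []))
    ([], [])
  st.1 ++ [st.2]

-- ===== PORT B =====
-- entries[0] = ws + entries[0]: entries is never empty in B (it starts as [[]] and only grows)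
def pvMergeHead (ws : List String) (entries : List (List String)) : List (List String) :=
  match entries with
  | [] => []
  | h :: t => (ws ++ h) :: t

-- 'for x in reversed(customs)' with accumulator entries = foldr; entries.insert(0, []) = cons
def fart_attack_alt (customs : List String) : List (List String) :=
  customs.foldr
    (fun x entries => if x = "" then [] :: entries else pvMergeHead (pvSplit x) entries)
    [[]]

-- ===== PRECONDITION & SPEC =====
def Spec_fart_attack (customs : List String) (out : List (List String)) : Prop := out = fart_attack_alt customs
instance (customs : List String) (out : List (List String)) : Decidable (Spec_fart_attack customs out) := by unfold Spec_fart_attack; infer_instance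

-- ===== CLAIM =====
def Claim_equal_fart_attack : Prop := ∀ (customs : List String), Dom_fart_attack customs → Spec_fart_attack customs (fart_attack customs)

-- ===== LEMMAS AND PROOFS =====

theorem alt_ne_nil (customs : List String) : fart_attack_alt customs ≠ [] := by
  induction customs with
  | nil => simp [fart_attack_alt]
  | cons x cs ih =>
      simp only [fart_attack_alt, List.foldr] at ih ⊢
      split
      · simp
      · cases h : List.foldr _ [[]] cs with
        | nil => exact absurd h ih
        | cons a t => simp [pvMergeHead]

theorem mergeHead_nil (l : List (List String)) (h : l ≠ []) : pvMergeHead [] l = l := by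
  cases l with
  | nil => exact absurd rfl h
  | cons a t => simp [pvMergeHead]

theorem mergeHead_mergeHead (f w : List String) (l : List (List String)) :
    pvMergeHead f (pvMergeHead w l) = pvMergeHead (f ++ w) l := by
  cases l <;> simp [pvMergeHead]

theorem pv_main (cs : List String) (E : List (List String)) (f : List String) :
    (cs.foldl
        (fun (s : List (List String) × List String) x =>
          if x ≠ "" then (s.1, s.2 ++ pvSplit x)
          else (s.1 ++ [s.2], []))
        (E, f)).1
      ++ [(cs.foldl
        (fun (s : List (List String) × List String) x =>
          if x ≠ "" then (s.1, s.2 ++ pvSplit x)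
          else (s.1 ++ [s.2], []))
        (E, f)).2]
      = E ++ pvMergeHead f (fart_attack_alt cs) := by
  induction cs generalizing E f with
  | nil => simp [fart_attack_alt, pvMergeHead]
  | cons x cs ih =>
      by_cases hx : x = ""
      · subst hx
        have h1 := ih (E ++ [f]) []
        rw [mergeHead_nil _ (alt_ne_nil cs)] at h1
        simp only [List.foldl]
        rw [if_neg (by simp), h1]
        simp [fart_attack_alt, pvMergeHead]
      · have h1 := ih E (f ++ pvSplit x)
        simp only [List.foldl]
        rw [if_pos hx, h1]
        simp only [fart_attack_alt, List.foldr, if_neg hx]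
        rw [mergeHead_mergeHead]

-- ===== VERDICT =====
theorem fart_attack_spec : Claim_equal_fart_attack := by
  intro customs _
  unfold Spec_fart_attack fart_attack
  have h := pv_main customs [] []
  simpa [mergeHead_nil _ (alt_ne_nil customs)] using h
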